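-- pv_equiv track=rewrite | github.com/hasnain-cyber/competitive-programming | codeforces/Queries about less or equal elements.py | lower_bound_binary_search
-- ===== SOURCE A (Python) =====
-- def lower_bound_binary_search(arr, x):
--     l, r = 0, len(arr) - 1
--     while l <= r:
--         mid = (l + r) // 2
--         if arr[mid] <= x:
--             l = mid + 1
--         else:
--             r = mid - 1
--     return r
-- ===== SOURCE B (Python) =====
-- def lower_bound_binary_search(arr, x):
--     # Recursive binary search over the half-open interval [lo, hi);
--     # probes the same midpoints as the closed-interval loop, returns lo - 1.
--     def go(lo, hi):
--         if lo >= hi: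
--             return lo
--         mid = (lo + hi - 1) // 2
--         return go(mid + 1, hi) if arr[mid] <= x else go(lo, mid)
--     return go(0, len(arr)) - 1
-- ===== Notes on version B (the rewrite author's own statement) =====
-- stated objective: alternative
-- what changed: Replaces the iterative closed-interval [l, r] loop that returns the final r with a recursive half-open-interval [lo, hi) search that shrinks hi to mid (never mid-1) and returns lo - 1.
import Mathlib
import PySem

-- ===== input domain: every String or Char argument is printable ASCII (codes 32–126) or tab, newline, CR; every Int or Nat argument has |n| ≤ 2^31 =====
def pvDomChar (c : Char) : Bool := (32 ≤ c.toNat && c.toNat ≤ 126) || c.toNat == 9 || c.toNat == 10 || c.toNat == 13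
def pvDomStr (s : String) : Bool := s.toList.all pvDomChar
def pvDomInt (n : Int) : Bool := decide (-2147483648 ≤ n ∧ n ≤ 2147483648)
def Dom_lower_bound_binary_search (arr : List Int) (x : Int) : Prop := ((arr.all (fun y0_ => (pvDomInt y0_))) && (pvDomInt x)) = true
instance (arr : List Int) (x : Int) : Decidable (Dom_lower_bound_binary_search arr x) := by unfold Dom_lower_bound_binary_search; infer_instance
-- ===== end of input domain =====

-- B replaces A's iterative closed-interval [l, r] loop (returning the final r) with a
-- recursive half-open-interval [lo, hi) binary search returning lo - 1; same cost (alternative).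


-- ===== PORT A =====
-- A's while loop over the state (l, r); arr[mid] is always in range whenever it is read
-- (0 ≤ l ≤ mid ≤ r ≤ len-1 there), so '(pyGet? …).getD 0' is exact.
def lbLoopA (arr : List Int) (x : Int) (l r : Int) : Int :=
  if _h : l ≤ r then
    let mid := PySem.Int.floordiv (l + r) 2
    if (PySem.List.pyGet? arr mid).getD 0 ≤ x then
      lbLoopA arr x (mid + 1) r
    else
      lbLoopA arr x l (mid - 1)
  else r
termination_by (r + 1 - l).toNat
decreasing_by
  · have := (PySem.Int.floordiv_two_mid_bounds (lo := l) (hi := r) _h).1; omega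
  · have := (PySem.Int.floordiv_two_mid_bounds (lo := l) (hi := r) _h).2; omega

def lower_bound_binary_search (arr : List Int) (x : Int) : Int :=
  lbLoopA arr x 0 ((arr.length : Int) - 1)

-- ===== PORT B =====
-- B's recursive helper go over the half-open interval [lo, hi); same exact-indexing remark.
def lbGoB (arr : List Int) (x : Int) (lo hi : Int) : Int :=
  if _h : lo ≥ hi then lo
  else
    let mid := PySem.Int.floordiv (lo + hi - 1) 2
    if (PySem.List.pyGet? arr mid).getD 0 ≤ x then
      lbGoB arr x (mid + 1) hi
    else
      lbGoB arr x lo mid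
termination_by (hi - lo).toNat
decreasing_by
  · have h2 := PySem.Int.floordiv_two_mid_bounds (lo := lo) (hi := hi - 1) (by omega)
    rw [show lo + (hi - 1) = lo + hi - 1 by ring] at h2; omega
  · have h2 := PySem.Int.floordiv_two_mid_bounds (lo := lo) (hi := hi - 1) (by omega)
    rw [show lo + (hi - 1) = lo + hi - 1 by ring] at h2; omega

def lower_bound_binary_search_alt (arr : List Int) (x : Int) : Int :=
  lbGoB arr x 0 (arr.length : Int) - 1

-- ===== PRECONDITION & SPEC =====
def Spec_lower_bound_binary_search (arr : List Int) (x : Int) (out : Int) : Prop := out = lower_bound_binary_search_alt arr x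
instance (arr : List Int) (x : Int) (out : Int) : Decidable (Spec_lower_bound_binary_search arr x out) := by unfold Spec_lower_bound_binary_search; infer_instance

-- ===== CLAIM (what is proved, stated in full; the proofs are below) =====
def Claim_equal_lower_bound_binary_search : Prop := ∀ (arr : List Int) (x : Int), Dom_lower_bound_binary_search arr x → Spec_lower_bound_binary_search arr x (lower_bound_binary_search arr x)

-- ===== LEMMAS AND PROOFS =====

-- Correspondence: the closed interval [lo, hi-1] and the half-open [lo, hi) probe the same
-- midpoints and take the same branches; the loop's final r is go's final lo minus 1.
theorem lbLoopA_eq_lbGoB (arr : List Int) (x : Int) :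
    ∀ (n : Nat) (lo hi : Int), lo ≤ hi → (hi - lo).toNat = n →
      lbLoopA arr x lo (hi - 1) = lbGoB arr x lo hi - 1 := by
  intro n
  induction n using Nat.strong_induction_on with
  | _ n ih =>
    intro lo hi hle hn
    rw [lbLoopA, lbGoB]
    by_cases h : lo ≤ hi - 1
    · have hmid := PySem.Int.floordiv_two_mid_bounds (lo := lo) (hi := hi - 1) h
      simp only [dif_pos h, dif_neg (by omega : ¬ lo ≥ hi)]
      have hmeq : lo + (hi - 1) = lo + hi - 1 := by ring
      rw [hmeq] at hmid ⊢
      split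
      · exact ih ((hi - (PySem.Int.floordiv (lo + hi - 1) 2 + 1)).toNat) (by omega)
          _ hi (by omega) rfl
      · have := ih ((PySem.Int.floordiv (lo + hi - 1) 2 - lo).toNat) (by omega)
          lo (PySem.Int.floordiv (lo + hi - 1) 2) (by omega) rfl
        omega
    · simp only [dif_neg h, dif_pos (by omega : lo ≥ hi)]
      omega

-- ===== VERDICT (by name: the statement is the Claim_ definition above) =====
theorem lower_bound_binary_search_spec : Claim_equal_lower_bound_binary_search := by
  intro arr x _
  unfold Spec_lower_bound_binary_search lower_bound_binary_search lower_bound_binary_search_alt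
  exact lbLoopA_eq_lbGoB arr x _ 0 (arr.length : Int) (by positivity) rfl
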